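-- pv_equiv track=rewrite | github.com/Bruno-dos-Santos/Training | Python/HackerRank/programmerStrings.py | programmerStrings
-- ===== SOURCE A (Python) =====
-- def programmerStrings(word, strInput):
--   start = 0
--   end = len(strInput)-1
--   letters = [letter for letter in word]
--   while (start < len(strInput) and len(letters) > 0):
--     if strInput[start] in letters:
--       letters.remove(strInput[start])
--     start = start + 1
--
--   letters = [letter for letter in word]
--
--   while (end >= 0 and len(letters)>0):
--     if strInput[end] in letters:
--       letters.remove(strInput[end])
--     end = end - 1
--
--   if (start > end ): return -1
--   return end - start + 1
-- ===== SOURCE B (Python) =====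
-- def programmerStrings(word, strInput):
--     # Closed-form via occurrence positions: index each character's positions once,
--     # then the left boundary is the max position of the k-th occurrence from the left
--     # and the right boundary the min position of the k-th occurrence from the right.
--     n = len(strInput)
--     pos = {}
--     for i, c in enumerate(strInput):
--         pos.setdefault(c, []).append(i)
--     need = {}
--     for c in word:
--         need[c] = need.get(c, 0) + 1
--     start = 0
--     end = n - 1
--     for c, k in need.items():
--         occ = pos.get(c, [])
--         if len(occ) < k:
--             start = n
--             end = -1
--             break
--         start = max(start, occ[k - 1] + 1)
--         end = min(end, occ[len(occ) - k] - 1)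
--     if start > end:
--         return -1
--     return end - start + 1
-- ===== Notes on version B (the rewrite author's own statement) =====
-- stated objective: faster
-- what changed: Replaces A's two scan-and-remove passes (list membership + remove inside each step, O(m) per character) by a closed-form computation: one pass indexes each character's occurrence positions, then the window start/end are the max/min over the word's distinct letters of the k-th occurrence position from the left/right.
import Mathlib
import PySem

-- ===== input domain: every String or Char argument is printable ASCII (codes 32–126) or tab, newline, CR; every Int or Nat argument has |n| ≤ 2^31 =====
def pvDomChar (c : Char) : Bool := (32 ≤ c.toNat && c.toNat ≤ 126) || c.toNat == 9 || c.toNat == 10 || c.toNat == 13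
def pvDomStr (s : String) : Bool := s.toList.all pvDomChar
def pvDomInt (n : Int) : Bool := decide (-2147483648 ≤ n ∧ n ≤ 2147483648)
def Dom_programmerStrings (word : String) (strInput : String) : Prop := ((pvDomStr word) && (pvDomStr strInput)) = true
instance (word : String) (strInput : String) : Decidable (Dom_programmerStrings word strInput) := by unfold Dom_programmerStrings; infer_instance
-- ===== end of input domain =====

-- B replaces A's two quadratic scan-and-remove passes by a closed-form computation over
-- per-character occurrence-position lists: the window start is the max position (+1) of the
-- k-th occurrence from the left of each needed character, the window end the min position (-1)
-- of the k-th occurrence from the right.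


-- ===== PORT A =====
-- left while-loop of A: recursion over the remaining chars of strInput, carrying the letters list
def pvLoopLA (s : List Char) (letters : List Char) (i : Int) : Int :=
  match s, letters with
  | _, [] => i
  | [], _ => i
  | c :: cs, ls => pvLoopLA cs (if ls.contains c then ls.erase c else ls) (i + 1)

-- right while-loop of A: same, over the reversed chars, decrementing the end index
def pvLoopRA (s : List Char) (letters : List Char) (e : Int) : Int :=
  match s, letters with
  | _, [] => e
  | [], _ => e
  | c :: cs, ls => pvLoopRA cs (if ls.contains c then ls.erase c else ls) (e - 1)

def programmerStrings (word : String) (strInput : String) : Int :=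
  let s := strInput.toList
  let start := pvLoopLA s word.toList 0
  let e := pvLoopRA s.reverse word.toList ((s.length : Int) - 1)
  if start > e then -1 else e - start + 1

-- ===== PORT B =====
-- pos: for i, c in enumerate(strInput): pos.setdefault(c, []).append(i)
def pvPosBuild (s : List Char) : PySem.Dict Char (List Int) :=
  (PySem.List.enumerate s 0).foldl (fun d p => d.modify p.2 [] (· ++ [p.1])) PySem.Dict.empty

-- need: for c in word: need[c] = need.get(c, 0) + 1
def pvNeedBuild (w : List Char) : PySem.Dict Char Int :=
  w.foldl (fun d c => d.insert c (d.getD c 0 + 1)) PySem.Dict.empty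

-- for c, k in need.items(): ... with break; the indices k-1 and len(occ)-k are provably
-- in range when reached (k ≥ 1 and k ≤ len(occ)), so plain getD is exact here
def pvItemsLoop (pos : PySem.Dict Char (List Int)) (n : Int) :
    List (Char × Int) → Int → Int → Int × Int
  | [], st, en => (st, en)
  | (c, k) :: rest, st, en =>
    let occ := pos.getD c []
    if (occ.length : Int) < k then (n, -1)
    else pvItemsLoop pos n rest (max st (occ.getD (k - 1).toNat 0 + 1))
          (min en (occ.getD ((occ.length : Int) - k).toNat 0 - 1))

def programmerStrings_alt (word : String) (strInput : String) : Int :=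
  let s := strInput.toList
  let n : Int := s.length
  let pos := pvPosBuild s
  let need := pvNeedBuild word.toList
  let r := pvItemsLoop pos n need.items 0 (n - 1)
  if r.1 > r.2 then -1 else r.2 - r.1 + 1

-- ===== PRECONDITION & SPEC =====
def Spec_programmerStrings (word : String) (strInput : String) (out : Int) : Prop := out = programmerStrings_alt word strInput
instance (word : String) (strInput : String) (out : Int) : Decidable (Spec_programmerStrings word strInput out) := by unfold Spec_programmerStrings; infer_instance

-- ===== CLAIM (what is proved, stated in full; the proofs are below) =====
def Claim_equal_programmerStrings : Prop := ∀ (word : String) (strInput : String), Dom_programmerStrings word strInput → Spec_programmerStrings word strInput (programmerStrings word strInput)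

-- ===== LEMMAS AND PROOFS =====

-- number of scan steps of A's while-loops (both loops advance one char per step)
def stepsL : List Char → List Char → Nat
  | _, [] => 0
  | [], _ => 0
  | c :: cs, ls => stepsL cs (if ls.contains c then ls.erase c else ls) + 1

-- 0-based positions of c in s
def posns : List Char → Char → List Nat
  | [], _ => []
  | a :: t, c => if a = c then 0 :: (posns t c).map (· + 1) else (posns t c).map (· + 1)

def covers (s ls : List Char) : Prop := ∀ c, ls.count c ≤ s.count c

-- position after the (count c in ls)-th occurrence of c in s
def fL (s ls : List Char) (c : Char) : Nat := (posns s c).getD (ls.count c - 1) 0 + 1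

def Msup (s ls : List Char) : Nat := ls.toFinset.sup (fL s ls)

theorem loopLA_eq (s : List Char) : ∀ (ls : List Char) (i : Int),
    pvLoopLA s ls i = i + (stepsL s ls : Int) := by
  induction s with
  | nil => intro ls i; cases ls <;> simp [pvLoopLA, stepsL]
  | cons c cs ih =>
    intro ls i
    cases ls with
    | nil => simp [pvLoopLA, stepsL]
    | cons a tl =>
      show pvLoopLA cs _ (i + 1) = _
      rw [ih]
      show i + 1 + _ = i + ((stepsL cs (if (a :: tl).contains c then (a :: tl).erase c else a :: tl) + 1 : Nat) : Int)
      push_cast; ring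

theorem loopRA_eq (s : List Char) : ∀ (ls : List Char) (e : Int),
    pvLoopRA s ls e = e - (stepsL s ls : Int) := by
  induction s with
  | nil => intro ls e; cases ls <;> simp [pvLoopRA, stepsL]
  | cons c cs ih =>
    intro ls e
    cases ls with
    | nil => simp [pvLoopRA, stepsL]
    | cons a tl =>
      show pvLoopRA cs _ (e - 1) = _
      rw [ih]
      show e - 1 - _ = e - ((stepsL cs (if (a :: tl).contains c then (a :: tl).erase c else a :: tl) + 1 : Nat) : Int)
      push_cast; ring

theorem posns_length (s : List Char) (c : Char) : (posns s c).length = s.count c := by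
  induction s with
  | nil => simp [posns]
  | cons a t ih =>
    by_cases h : a = c
    · simp [posns, h, ih]
    · simp [posns, h, ih]

theorem posns_lt (s : List Char) (c : Char) : ∀ k ∈ posns s c, k < s.length := by
  induction s with
  | nil => simp [posns]
  | cons a t ih =>
    intro k hk
    by_cases h : a = c
    · simp only [posns, if_pos h, List.mem_cons, List.mem_map] at hk
      rcases hk with h0 | ⟨x, hx, rfl⟩
      · simp [h0]
      · have := ih x hx; simp only [List.length_cons]; omega
    · simp only [posns, if_neg h, List.mem_map] at hk
      rcases hk with ⟨x, hx, rfl⟩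
      have := ih x hx; simp only [List.length_cons]; omega

theorem getD_map_lt {α β : Type} (f : α → β) (Y : List α) (j : Nat) (h : j < Y.length)
    (d : α) (e : β) : (Y.map f).getD j e = f (Y.getD j d) := by
  rw [List.getD_eq_getElem _ _ (by simpa using h), List.getD_eq_getElem _ _ h, List.getElem_map]

theorem getD_rev_lt {α : Type} (Y : List α) (j : Nat) (h : j < Y.length) (d : α) :
    Y.reverse.getD j d = Y.getD (Y.length - 1 - j) d := by
  have h' : j < Y.reverse.length := by simpa using h
  have h2 : Y.length - 1 - j < Y.length := by omega
  rw [List.getD_eq_getElem _ _ h', List.getD_eq_getElem _ _ h2, List.getElem_reverse]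

theorem posns_append (u v : List Char) (c : Char) :
    posns (u ++ v) c = posns u c ++ (posns v c).map (· + u.length) := by
  induction u with
  | nil => simp [posns]
  | cons b t ih =>
    by_cases hb : b = c
    · simp only [List.cons_append, posns, if_pos hb, ih, List.map_append, List.map_map,
        List.length_cons]
      congr 2
    · simp only [List.cons_append, posns, if_neg hb, ih, List.map_append, List.map_map,
        List.length_cons]
      congr 1

theorem posns_reverse (s : List Char) (c : Char) :
    posns s.reverse c = ((posns s c).map (fun k => s.length - 1 - k)).reverse := by
  induction s with
  | nil => simp [posns]
  | cons a t ih =>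
    rw [List.reverse_cons, posns_append, ih]
    by_cases h : a = c
    · simp only [posns, if_pos h, List.map_cons, List.map_nil, List.length_reverse,
        List.length_cons, List.map_map, List.reverse_cons]
      congr 2
      · apply List.map_congr_left
        intro x _
        simp only [Function.comp_apply]
        omega
      · simp
    · simp only [posns, if_neg h, List.map_nil, List.length_reverse, List.length_cons,
        List.map_map, List.append_nil]
      apply congrArg
      apply List.map_congr_left
      intro x _
      simp only [Function.comp_apply]
      omega

theorem sup_add_one {S : Finset Char} (h : S.Nonempty) (g : Char → ℕ) :
    S.sup (fun a => g a + 1) = S.sup g + 1 := by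
  induction h using Finset.Nonempty.cons_induction with
  | singleton a => simp
  | cons a S ha hS ih =>
    rw [Finset.sup_cons, Finset.sup_cons, ih]
    omega

-- one step of A's loop preserves coverability of the remaining needs
theorem covers_step (c : Char) (cs ls : List Char) :
    covers cs (if ls.contains c then ls.erase c else ls) ↔ covers (c :: cs) ls := by
  by_cases hc : c ∈ ls
  · rw [if_pos (by simpa using hc)]
    have h1 : 1 ≤ ls.count c := List.count_pos_iff.mpr hc
    constructor
    · intro h x
      by_cases hxc : x = c
      · subst hxc
        have hx := h x
        rw [List.count_erase_self] at hx
        rw [List.count_cons_self]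
        omega
      · have hx := h x
        rw [List.count_erase_of_ne hxc] at hx
        rwa [List.count_cons_of_ne (Ne.symm hxc)]
    · intro h x
      by_cases hxc : x = c
      · subst hxc
        have hx := h x
        rw [List.count_cons_self] at hx
        rw [List.count_erase_self]
        omega
      · have hx := h x
        rw [List.count_cons_of_ne (Ne.symm hxc)] at hx
        rwa [List.count_erase_of_ne hxc]
  · rw [if_neg (by simpa using hc)]
    have h0 : ls.count c = 0 := List.count_eq_zero.mpr hc
    constructor
    · intro h x
      by_cases hxc : x = c
      · subst hxc
        rw [List.count_cons_self]
        have := h x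
        omega
      · rw [List.count_cons_of_ne (Ne.symm hxc)]
        exact h x
    · intro h x
      by_cases hxc : x = c
      · subst hxc
        omega
      · have hx := h x
        rwa [List.count_cons_of_ne (Ne.symm hxc)] at hx

theorem fL_cons_ne (c : Char) (cs ls : List Char) (a : Char) (ha : a ≠ c)
    (h1 : 1 ≤ ls.count a) (h2 : ls.count a ≤ cs.count a) :
    fL (c :: cs) ls a = (posns cs a).getD (ls.count a - 1) 0 + 2 := by
  have hne : ¬ (c = a) := fun e => ha e.symm
  have hlt : ls.count a - 1 < (posns cs a).length := by rw [posns_length]; omega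
  simp only [fL, posns, if_neg hne]
  rw [getD_map_lt _ _ _ hlt 0 0]

theorem stepsL_covers (s : List Char) : ∀ ls, covers s ls → stepsL s ls = Msup s ls := by
  induction s with
  | nil =>
    intro ls h
    have : ls = [] := by
      rcases ls with _ | ⟨a, t⟩
      · rfl
      · have := h a
        rw [List.count_cons_self] at this
        simp at this
    subst this
    simp [stepsL, Msup]
  | cons c cs ih =>
    intro ls h
    rcases ls with _ | ⟨a0, tl⟩
    · simp [stepsL, Msup]
    set L := a0 :: tl with hL
    have hnonempty : L.toFinset.Nonempty := ⟨a0, by simp [hL]⟩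
    have hstep : stepsL (c :: cs) L
        = stepsL cs (if L.contains c then L.erase c else L) + 1 := rfl
    have hcov' : covers cs (if L.contains c then L.erase c else L) := (covers_step c cs L).mpr h
    by_cases hc : c ∈ L
    · have hcont : L.contains c = true := by simpa using hc
      have hcov2 : covers cs (L.erase c) := by rwa [if_pos hcont] at hcov'
      have hstep2 : stepsL (c :: cs) L = stepsL cs (L.erase c) + 1 := by
        rw [hstep, if_pos hcont]
      have hk1 : 1 ≤ L.count c := List.count_pos_iff.mpr hc
      have hkc : L.count c ≤ cs.count c + 1 := by
        have := h c
        rw [List.count_cons_self] at this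
        omega
      by_cases hk : L.count c = 1
      · -- c occurs once in the needs: it drops out of the max
        have herase : (L.erase c).count c = 0 := by
          rw [List.count_erase_self]; omega
        have hTf : (L.erase c).toFinset = L.toFinset.erase c := by
          ext x
          by_cases hxc : x = c
          · subst hxc
            simp [List.mem_toFinset, ← List.count_pos_iff, herase]
          · simp [List.mem_toFinset, Finset.mem_erase, hxc,
              ← List.count_pos_iff, List.count_erase_of_ne hxc]
        rw [hstep2, ih _ hcov2]
        have hMc : fL (c :: cs) L c = 1 := by
          simp [fL, posns, hk]
        have huni : ∀ x ∈ L.toFinset.erase c,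
            fL (c :: cs) L x = fL cs (L.erase c) x + 1 := by
          intro x hx
          rcases Finset.mem_erase.mp hx with ⟨hxc, hxL⟩
          have hx1 : 1 ≤ L.count x := List.count_pos_iff.mpr (List.mem_toFinset.mp hxL)
          have hx2 : L.count x ≤ cs.count x := by
            have hh := h x
            rwa [List.count_cons_of_ne (Ne.symm hxc)] at hh
          rw [fL_cons_ne c cs L x hxc hx1 hx2]
          simp [fL, List.count_erase_of_ne hxc]
        have hsplit : L.toFinset = insert c (L.toFinset.erase c) :=
          (Finset.insert_erase (List.mem_toFinset.mpr hc)).symm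
        rw [Msup, Msup, hTf, hsplit, Finset.sup_insert, hMc,
          Finset.sup_congr rfl huni]
        have hee : (insert c (L.toFinset.erase c)).erase c = L.toFinset.erase c := by
          exact Finset.erase_insert (Finset.notMem_erase c _)
        rw [hee]
        rcases Finset.eq_empty_or_nonempty (L.toFinset.erase c) with he | hne
        · simp [he]
        · rw [sup_add_one hne]
          exact (max_eq_right (by omega)).symm
      · -- c occurs at least twice: the char set is unchanged, every term shifts by one
        have hk2 : 2 ≤ L.count c := by omega
        have hTf : (L.erase c).toFinset = L.toFinset := by
          ext x
          by_cases hxc : x = c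
          · subst hxc
            simp only [List.mem_toFinset, ← List.count_pos_iff, List.count_erase_self]
            omega
          · simp [List.mem_toFinset, ← List.count_pos_iff, List.count_erase_of_ne hxc]
        rw [hstep2, ih _ hcov2]
        have huni : ∀ x ∈ L.toFinset, fL (c :: cs) L x = fL cs (L.erase c) x + 1 := by
          intro x hx
          by_cases hxc : x = c
          · subst hxc
            have hlt : L.count x - 2 < (posns cs x).length := by rw [posns_length]; omega
            have hidx : L.count x - 1 = (L.count x - 2) + 1 := by omega
            simp only [fL, posns, if_true, hidx, List.getD_cons_succ]
            rw [getD_map_lt _ _ _ hlt 0 0, List.count_erase_self]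
            have h2 : L.count x - 1 - 1 = L.count x - 2 := by omega
            rw [h2]
          · have hx1 : 1 ≤ L.count x := List.count_pos_iff.mpr (List.mem_toFinset.mp hx)
            have hx2 : L.count x ≤ cs.count x := by
              have hh := h x
              rwa [List.count_cons_of_ne (Ne.symm hxc)] at hh
            rw [fL_cons_ne c cs L x hxc hx1 hx2]
            simp [fL, List.count_erase_of_ne hxc]
        rw [Msup, Msup, hTf, Finset.sup_congr rfl huni, sup_add_one hnonempty]
    · -- c is not needed: the needs are unchanged, every term shifts by one
      have hcont : L.contains c = false := by simpa using hc
      have hnc : ¬ (L.contains c = true) := by simp only [hcont]; decide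
      have hcov2 : covers cs L := by rwa [if_neg hnc] at hcov'
      have hstep2 : stepsL (c :: cs) L = stepsL cs L + 1 := by
        rw [hstep, if_neg hnc]
      rw [hstep2, ih _ hcov2]
      have huni : ∀ x ∈ L.toFinset, fL (c :: cs) L x = fL cs L x + 1 := by
        intro x hx
        have hxc : x ≠ c := fun e => hc (e ▸ List.mem_toFinset.mp hx)
        have hx1 : 1 ≤ L.count x := List.count_pos_iff.mpr (List.mem_toFinset.mp hx)
        have hx2 : L.count x ≤ cs.count x := by
          have hh := h x
          rwa [List.count_cons_of_ne (Ne.symm hxc)] at hh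
        rw [fL_cons_ne c cs L x hxc hx1 hx2]
        simp [fL]
      rw [Msup, Msup, Finset.sup_congr rfl huni, sup_add_one hnonempty]

theorem stepsL_not_covers (s : List Char) : ∀ ls, ¬ covers s ls → stepsL s ls = s.length := by
  induction s with
  | nil => intro ls h; cases ls <;> simp [stepsL]
  | cons c cs ih =>
    intro ls h
    rcases ls with _ | ⟨a0, tl⟩
    · exact absurd (fun x => by simp) h
    have h' : ¬ covers cs (if (a0 :: tl).contains c then (a0 :: tl).erase c else a0 :: tl) :=
      fun hcv => h ((covers_step c cs (a0 :: tl)).mp hcv)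
    have hstep : stepsL (c :: cs) (a0 :: tl)
        = stepsL cs (if (a0 :: tl).contains c then (a0 :: tl).erase c else a0 :: tl) + 1 := rfl
    rw [hstep, ih _ h', List.length_cons]

theorem getD_map_cast (Y : List Nat) (j : Nat) :
    (Y.map (Nat.cast : Nat → Int)).getD j 0 = ((Y.getD j 0 : Nat) : Int) := by
  by_cases h : j < Y.length
  · rw [getD_map_lt _ _ _ h 0 0]
  · have h1 : Y.length ≤ j := by omega
    rw [List.getD_eq_default _ _ (by simpa using h1), List.getD_eq_default _ _ h1]
    simp

theorem foldl_modify_getD (l : List (Int × Char)) (c : Char) :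
    ∀ d : PySem.Dict Char (List Int),
    (l.foldl (fun d p => d.modify p.2 [] (· ++ [p.1])) d).getD c []
      = d.getD c [] ++ (l.filter (fun p => p.2 == c)).map (·.1) := by
  induction l with
  | nil => intro d; simp
  | cons p t ih =>
    rcases p with ⟨pi, pc⟩
    intro d
    simp only [List.foldl_cons, ih]
    by_cases hp : pc = c
    · subst hp
      rw [List.filter_cons_of_pos (by simp)]
      rw [PySem.Dict.getD_modify, if_pos rfl]
      simp
    · rw [List.filter_cons_of_neg (by simpa using hp)]
      rw [PySem.Dict.getD_modify, if_neg (fun e => hp e.symm)]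

theorem enum_filter (s : List Char) (c : Char) : ∀ i : Int,
    ((PySem.List.enumerate s i).filter (fun p => p.2 == c)).map (·.1)
      = (posns s c).map (fun (k : Nat) => ((k : Int) + i)) := by
  induction s with
  | nil => intro i; simp [posns]
  | cons a t ih =>
    intro i
    rw [PySem.List.enumerate_cons]
    by_cases h : a = c
    · rw [List.filter_cons_of_pos (by simpa using h), List.map_cons, ih (i + 1)]
      simp only [posns, if_pos h, List.map_cons, List.map_map]
      congr 1
      · simp
      · apply List.map_congr_left
        intro x _
        simp only [Function.comp_apply]
        push_cast; ring
    · rw [List.filter_cons_of_neg (by simpa using h), ih (i + 1)]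
      simp only [posns, if_neg h, List.map_map]
      apply List.map_congr_left
      intro x _
      simp only [Function.comp_apply]
      push_cast; ring

theorem posBuild_getD (s : List Char) (c : Char) :
    (pvPosBuild s).getD c [] = (posns s c).map (Nat.cast : Nat → Int) := by
  rw [pvPosBuild, foldl_modify_getD, enum_filter]
  simp

theorem needBuild_items (w : List Char) :
    (pvNeedBuild w).items = (PySem.Set.ofList w).map (fun c => (c, (w.count c : Int))) := by
  rw [pvNeedBuild, PySem.Dict.foldl_insert_getD_add_one_eq_counter, PySem.Dict.items_counter]

theorem foldl_max_eq (g : Char → Nat) : ∀ (l : List Char) (st : Int), 0 ≤ st →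
    l.foldl (fun a c => max a ((g c : Nat) : Int)) st = max st ((l.toFinset.sup g : Nat) : Int) := by
  intro l
  induction l with
  | nil => intro st hst; simp; omega
  | cons a t ih =>
    intro st hst
    rw [List.foldl_cons, ih _ (le_trans hst (le_max_left _ _)), List.toFinset_cons,
      Finset.sup_insert]
    have h1 : ((g a ⊔ t.toFinset.sup g : Nat) : Int)
        = max ((g a : Nat) : Int) ((t.toFinset.sup g : Nat) : Int) := by
      push_cast
      rfl
    rw [h1, max_assoc]

theorem foldl_min_complement (K : Int) (q : Char → Int) : ∀ (l : List Char) (st : Int),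
    l.foldl (fun a c => min a (K - q c)) st = K - l.foldl (fun a c => max a (q c)) (K - st) := by
  intro l
  induction l with
  | nil => intro st; simp only [List.foldl_nil]; omega
  | cons a t ih =>
    intro st
    rw [List.foldl_cons, List.foldl_cons, ih]
    have : K - min st (K - q a) = max (K - st) (q a) := by omega
    rw [this]

theorem itemsLoop_eq (s w : List Char) : ∀ (dl : List Char), (∀ c ∈ dl, c ∈ w) → ∀ (st en : Int),
    pvItemsLoop (pvPosBuild s) (s.length : Int) (dl.map (fun c => (c, (w.count c : Int)))) st en
    = if ∀ c ∈ dl, w.count c ≤ s.count c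
      then (dl.foldl (fun a c => max a ((fL s w c : Nat) : Int)) st,
            dl.foldl (fun a c => min a (((s.length : Int) - 1) - (fL s.reverse w c : Nat))) en)
      else ((s.length : Int), -1) := by
  intro dl
  induction dl with
  | nil => intro _ st en; simp [pvItemsLoop]
  | cons c rest ih =>
    intro hmem st en
    have hcw : c ∈ w := hmem c (by simp)
    have hk1 : 1 ≤ w.count c := List.count_pos_iff.mpr hcw
    have hocc : (pvPosBuild s).getD c [] = (posns s c).map (Nat.cast : Nat → Int) :=
      posBuild_getD s c
    have hlen : ((pvPosBuild s).getD c []).length = s.count c := by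
      rw [hocc, List.length_map, posns_length]
    simp only [List.map_cons, pvItemsLoop]
    by_cases hcv : w.count c ≤ s.count c
    · rw [if_neg (by rw [hlen]; push_cast; omega)]
      -- the two update terms
      have hidx1 : ((w.count c : Int) - 1).toNat = w.count c - 1 := by omega
      have hterm1 : (((pvPosBuild s).getD c []).getD ((w.count c : Int) - 1).toNat 0) + 1
          = ((fL s w c : Nat) : Int) := by
        rw [hidx1, hocc, getD_map_cast, fL]
        push_cast; ring
      have hidx2 : ((((pvPosBuild s).getD c []).length : Int) - (w.count c : Int)).toNat
          = s.count c - w.count c := by rw [hlen]; omega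
      set m := s.count c with hm
      set k := w.count c with hkdef
      set Y := posns s c with hY
      have hYlen : Y.length = m := posns_length s c
      have hp_lt : Y.getD (m - k) 0 < s.length := by
        have hmk : m - k < Y.length := by omega
        have : Y.getD (m - k) 0 ∈ Y := by
          rw [List.getD_eq_getElem _ _ hmk]
          exact List.getElem_mem _
        exact posns_lt s c _ this
      have hfrev : fL s.reverse w c = s.length - Y.getD (m - k) 0 := by
        have hrev := posns_reverse s c
        have hmaplen : ((posns s c).map (fun x => s.length - 1 - x)).length = m := by
          rw [List.length_map, hYlen]
        have hk1m : k - 1 < ((posns s c).map (fun x => s.length - 1 - x)).reverse.length := by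
          rw [List.length_reverse, hmaplen]; omega
        rw [fL, ← hkdef, hrev,
          getD_rev_lt _ _ (by rw [hmaplen]; omega) 0]
        rw [hmaplen]
        have hidx : m - 1 - (k - 1) = m - k := by omega
        rw [hidx, getD_map_lt _ _ _ (by rw [hYlen]; omega) 0 0, ← hY]
        omega
      have hterm2 : (((pvPosBuild s).getD c []).getD
            ((((pvPosBuild s).getD c []).length : Int) - (w.count c : Int)).toNat 0) - 1
          = ((s.length : Int) - 1) - ((fL s.reverse w c : Nat) : Int) := by
        rw [hidx2, hocc, getD_map_cast, hfrev]
        omega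
      rw [hterm1, hterm2, ih (fun x hx => hmem x (by simp [hx]))]
      by_cases hrest : ∀ x ∈ rest, w.count x ≤ s.count x
      · rw [if_pos hrest, if_pos (by intro x hx; rcases List.mem_cons.mp hx with rfl | hx'
                                     · exact hcv
                                     · exact hrest x hx')]
        simp
      · rw [if_neg hrest, if_neg (fun hall => hrest (fun x hx => hall x (by simp [hx])))]
    · rw [if_pos (by rw [hlen]; push_cast; omega)]
      rw [if_neg (fun hall => hcv (hall c (by simp)))]

theorem covers_reverse (s w : List Char) : covers s.reverse w ↔ covers s w := by
  constructor <;> intro h x <;> have := h x <;> simpa [List.count_reverse] using this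

theorem ofList_toFinset (w : List Char) : (PySem.Set.ofList w).toFinset = w.toFinset := by
  ext x; simp [List.mem_toFinset, PySem.Set.mem_ofList]

-- ===== VERDICT (by name: the statement is the Claim_ definition above) =====
theorem programmerStrings_spec : Claim_equal_programmerStrings := by
  intro word strInput _
  show programmerStrings word strInput = programmerStrings_alt word strInput
  simp only [programmerStrings, programmerStrings_alt]
  set s := strInput.toList with hs
  set w := word.toList with hw
  have hitems := needBuild_items w
  rw [hitems, itemsLoop_eq s w (PySem.Set.ofList w)
    (fun c hc => by rwa [PySem.Set.mem_ofList] at hc)]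
  rw [loopLA_eq, loopRA_eq]
  by_cases hcov : covers s w
  · have hcond : ∀ c ∈ PySem.Set.ofList w, w.count c ≤ s.count c := fun c _ => hcov c
    rw [if_pos hcond]
    have hstart : (0 : Int) + (stepsL s w : Int)
        = (PySem.Set.ofList w).foldl (fun a c => max a ((fL s w c : Nat) : Int)) 0 := by
      rw [stepsL_covers s w hcov, foldl_max_eq _ _ 0 le_rfl, ofList_toFinset, Msup]
      simp
    have hcovr : covers s.reverse w := (covers_reverse s w).mpr hcov
    have hend : ((s.length : Int) - 1) - (stepsL s.reverse w : Int)
        = (PySem.Set.ofList w).foldl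
            (fun a c => min a (((s.length : Int) - 1) - (fL s.reverse w c : Nat))) ((s.length : Int) - 1) := by
      rw [stepsL_covers s.reverse w hcovr,
        foldl_min_complement ((s.length : Int) - 1) (fun c => ((fL s.reverse w c : Nat) : Int)),
        sub_self, foldl_max_eq _ _ 0 le_rfl, ofList_toFinset]
      have : Msup s.reverse w = w.toFinset.sup (fL s.reverse w) := rfl
      rw [← this]
      simp
    rw [← hstart, ← hend]
  · have hcond : ¬ ∀ c ∈ PySem.Set.ofList w, w.count c ≤ s.count c := by
      intro hall
      apply hcov
      intro c
      by_cases hcmem : c ∈ w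
      · exact hall c (by rwa [PySem.Set.mem_ofList])
      · have : w.count c = 0 := List.count_eq_zero.mpr hcmem
        omega
    rw [if_neg hcond]
    have hrevlen : s.reverse.length = s.length := List.length_reverse
    rw [stepsL_not_covers s w hcov,
      stepsL_not_covers s.reverse w (fun hc => hcov ((covers_reverse s w).mp hc)), hrevlen]
    have h1 : (0 : Int) + (s.length : Int) = (s.length : Int) := by ring
    have h2 : ((s.length : Int) - 1) - (s.length : Int) = -1 := by ring
    rw [h1, h2]
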